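-- pv_equiv track=rewrite | github.com/saisravanreddy/SmartGrids--RL | apex_dqn/microgrids_agents.py | adl_give_possible_actions
-- ===== SOURCE A (Python) =====
-- import copy
--
-- def adl_give_possible_actions(state):
--
--     possible_actions = []
--     possible_actions.append(0)
--     for i in range(3):
--         if (state & 2 ** i):
--             temp = copy.deepcopy(possible_actions)
--             for j in range(len(temp)):
--                 temp[j] += 2 ** i
--
--             possible_actions.extend(temp)
--     return possible_actions
-- ===== SOURCE B (Python) =====
-- def adl_give_possible_actions(state):
--     bits = [2 ** i for i in range(3) if state & 2 ** i]
--     return [sum(b for j, b in enumerate(bits) if (m >> j) & 1)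
--             for m in range(2 ** len(bits))]
-- ===== Notes on version B (the rewrite author's own statement) =====
-- stated objective: alternative
-- what changed: Replaces A's deepcopy-and-extend list doubling over the three bits with collecting the present bit values once and directly enumerating index bitmasks m in range(2**len(bits)), summing the selected bit values per mask (identical order and values).
import Mathlib
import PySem

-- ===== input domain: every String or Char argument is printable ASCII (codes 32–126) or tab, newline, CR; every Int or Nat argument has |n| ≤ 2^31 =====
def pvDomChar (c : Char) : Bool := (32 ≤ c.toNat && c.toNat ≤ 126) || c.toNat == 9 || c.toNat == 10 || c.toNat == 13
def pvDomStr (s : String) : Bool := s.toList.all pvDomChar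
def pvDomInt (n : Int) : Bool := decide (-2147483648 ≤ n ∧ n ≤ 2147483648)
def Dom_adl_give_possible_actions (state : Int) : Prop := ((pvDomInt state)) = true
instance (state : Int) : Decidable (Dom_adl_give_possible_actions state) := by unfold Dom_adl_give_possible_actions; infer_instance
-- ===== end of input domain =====

-- B replaces A's copy-and-extend list doubling with a direct enumeration of index
-- bitmasks over the list of present bit values (same order, same values): alternative decomposition.

-- ===== PORT A =====
-- possible_actions = [0]; for i in range(3): if state & 2**i: extend with a +2**i copy
def adl_give_possible_actions (state : Int) : List Int :=
  (PySem.List.pyRange 0 3 1).foldl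
    (fun pa i =>
      if PySem.Int.band state ((2 : Int) ^ i.toNat) ≠ 0 then
        pa ++ pa.map (fun x => x + (2 : Int) ^ i.toNat)
      else pa)
    [(0 : Int)]

-- ===== PORT B =====
-- bits = [2**i for i in range(3) if state & 2**i]
-- return [sum(b for j, b in enumerate(bits) if (m >> j) & 1) for m in range(2 ** len(bits))]
def adl_give_possible_actions_alt (state : Int) : List Int :=
  let bits : List Int :=
    (PySem.List.pyRange 0 3 1).filterMap
      (fun i => if PySem.Int.band state ((2 : Int) ^ i.toNat) ≠ 0
                then some ((2 : Int) ^ i.toNat) else none)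
  (PySem.List.pyRange 0 ((2 : Int) ^ bits.length) 1).map
    (fun m =>
      (PySem.List.enumerate bits 0).foldl
        (fun s jb => if PySem.Int.band (m >>> jb.1.toNat) 1 ≠ 0 then s + jb.2 else s) 0)

-- ===== PRECONDITION & SPEC =====
def Spec_adl_give_possible_actions (state : Int) (out : List Int) : Prop := out = adl_give_possible_actions_alt state
instance (state : Int) (out : List Int) : Decidable (Spec_adl_give_possible_actions state out) := by unfold Spec_adl_give_possible_actions; infer_instance

-- ===== CLAIM (what is proved, stated in full; the proofs are below) =====
def Claim_equal_adl_give_possible_actions : Prop := ∀ (state : Int), Dom_adl_give_possible_actions state → Spec_adl_give_possible_actions state (adl_give_possible_actions state)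

-- ===== LEMMAS AND PROOFS =====
-- Both programs depend on state only through the three tests 'state & 2^i ≠ 0' (i = 0,1,2):
-- case on those three booleans and evaluate both closed programs.
theorem adl_lem (state : Int) :
    adl_give_possible_actions state = adl_give_possible_actions_alt state := by
  by_cases h0 : PySem.Int.band state 1 = 0 <;>
  by_cases h1 : PySem.Int.band state 2 = 0 <;>
  by_cases h2 : PySem.Int.band state 4 = 0 <;>
  simp [adl_give_possible_actions, adl_give_possible_actions_alt,
    show PySem.List.pyRange 0 3 1 = [0, 1, 2] from rfl,
    show PySem.List.pyRange 0 2 1 = [0, 1] from rfl,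
    show PySem.List.pyRange 0 4 1 = [0, 1, 2, 3] from rfl,
    show PySem.List.pyRange 0 8 1 = [0, 1, 2, 3, 4, 5, 6, 7] from rfl,
    show PySem.List.pyRange 0 1 1 = [0] from rfl,
    PySem.List.enumerate, h0, h1, h2] <;> decide

-- ===== VERDICT (by name: the statement is the Claim_ definition above) =====
theorem adl_give_possible_actions_spec : Claim_equal_adl_give_possible_actions := by
  intro state _
  unfold Spec_adl_give_possible_actions
  exact adl_lem state
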